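-- pv_equiv track=rewrite | github.com/ibtosmlin/atcoder | work/abc238_d.py | check
-- ===== SOURCE A (Python) =====
-- def check(a, s):
--     if a>s:
--         return 'No'
--     kuri = 0
--     for i in range(60):
--         an = a >> i & 1
--         sm = s >> i & 1
--         if an == 1:
--             if sm == 0 and kuri == 0:
--                 kuri = 1
--                 continue
--             if sm == 0 and kuri == 1:
--                 return 'No'
--             if sm == 1 and kuri == 1:
--                 kuri = 1
--                 continue
--             if sm == 1 and kuri == 0:
--                 return 'No'
--         else:
--             if sm == 0 and kuri == 0:
--                 kuri = 0
--                 continue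
--             if sm == 0 and kuri == 1:
--                 kuri = 1
--                 continue
--             if sm == 1 and kuri == 0:
--                 kuri = 0
--                 continue
--             if sm == 1 and kuri == 1:
--                 kuri = 0
--                 continue
--
--     return 'Yes'
-- ===== SOURCE B (Python) =====
-- def check(a, s):
--     if a > s:
--         return 'No'
--     t = s - 2 * a
--     return 'Yes' if t >= 0 and t & a == 0 else 'No'
-- ===== Notes on version B (the rewrite author's own statement) =====
-- stated objective: simpler
-- what changed: Replaces the 60-iteration per-bit carry automaton with a single arithmetic test: x+y=s with x&y=a is solvable iff t=s-2a is nonnegative and bit-disjoint from a (t=x^y), so B returns 'Yes' iff t>=0 and t&a==0.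
import Mathlib
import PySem

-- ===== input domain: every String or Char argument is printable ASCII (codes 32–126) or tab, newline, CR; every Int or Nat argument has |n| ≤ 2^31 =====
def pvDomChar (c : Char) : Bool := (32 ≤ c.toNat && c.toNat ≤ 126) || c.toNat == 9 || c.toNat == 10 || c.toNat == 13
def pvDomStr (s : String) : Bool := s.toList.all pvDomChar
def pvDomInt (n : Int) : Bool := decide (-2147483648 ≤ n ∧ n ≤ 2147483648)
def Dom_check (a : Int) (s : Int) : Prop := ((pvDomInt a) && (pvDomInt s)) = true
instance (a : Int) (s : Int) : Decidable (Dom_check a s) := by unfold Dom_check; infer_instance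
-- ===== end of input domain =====

-- B replaces A's 60-iteration per-bit carry automaton by a single arithmetic test
-- (x+y=s ∧ x&y=a solvable iff t=s-2a is nonnegative and bit-disjoint from a); objective: simpler.

-- ===== PORT A =====
-- one iteration of A's `for i in range(60)` loop; none = the loop body executed `return 'No'`
def checkStep (a : Int) (s : Int) (st : Option Int) (i : Int) : Option Int :=
  match st with
  | none => none
  | some kuri =>
    let an := PySem.Int.band (a >>> i.toNat) 1
    let sm := PySem.Int.band (s >>> i.toNat) 1
    if an = 1 then
      if sm = 0 ∧ kuri = 0 then some 1
      else if sm = 0 ∧ kuri = 1 then none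
      else if sm = 1 ∧ kuri = 1 then some 1
      else if sm = 1 ∧ kuri = 0 then none
      else some kuri
    else
      if sm = 0 ∧ kuri = 0 then some 0
      else if sm = 0 ∧ kuri = 1 then some 1
      else if sm = 1 ∧ kuri = 0 then some 0
      else if sm = 1 ∧ kuri = 1 then some 0
      else some kuri

def check (a : Int) (s : Int) : String :=
  if a > s then "No"
  else
    match (PySem.List.pyRange 0 60).foldl (checkStep a s) (some 0) with
    | none => "No"
    | some _ => "Yes"

-- ===== PORT B =====
def check_alt (a : Int) (s : Int) : String :=
  if a > s then "No"
  else
    let t := s - 2 * a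
    if t ≥ 0 ∧ PySem.Int.band t a = 0 then "Yes" else "No"

-- ===== PRECONDITION & SPEC =====
def Spec_check (a : Int) (s : Int) (out : String) : Prop := out = check_alt a s
instance (a : Int) (s : Int) (out : String) : Decidable (Spec_check a s out) := by unfold Spec_check; infer_instance

-- ===== CLAIM (what is proved, stated in full; the proofs are below) =====
def Claim_equal_check : Prop := ∀ (a : Int) (s : Int), Dom_check a s → Spec_check a s (check a s)

-- ===== LEMMAS AND PROOFS =====

-- A's loop, rephrased as a recursion that peels the current low bit (proof-side only).
def pvLoop : Int → Int → Int → Nat → Option Int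
  | _, _, k, 0 => some k
  | a, s, k, n+1 =>
    if a % 2 = 1 then
      if s % 2 = k then pvLoop (a / 2) (s / 2) 1 n else none
    else
      pvLoop (a / 2) (s / 2) (if k = 1 ∧ s % 2 = 0 then 1 else 0) n

-- "the low n bits of t and of a are disjoint"
def pvDisj (n : Nat) (t a : Int) : Prop :=
  ∀ i : Nat, i < n → ¬((t / 2^i) % 2 = 1 ∧ (a / 2^i) % 2 = 1)

lemma pvHalfshift (x : Int) (i : Nat) : (x / 2) / (2:Int)^i = x / 2^(i+1) := by
  rw [Int.ediv_ediv_of_nonneg (by norm_num), pow_succ]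
  congr 1
  ring

lemma pvDisj_succ (n : Nat) (t a : Int) :
    pvDisj (n+1) t a ↔ (¬(t % 2 = 1 ∧ a % 2 = 1)) ∧ pvDisj n (t/2) (a/2) := by
  constructor
  · intro h
    refine ⟨by simpa using h 0 (by omega), ?_⟩
    intro i hi
    have := h (i+1) (by omega)
    simpa [pvHalfshift] using this
  · rintro ⟨h0, h⟩ i hi
    cases i with
    | zero => simpa using h0
    | succ j =>
      have := h j (by omega)
      simpa [pvHalfshift] using this

lemma pvHalve (x M : Int) : (x % (2*M)) / 2 = (x / 2) % M := by
  have h2 : x / (2*M) = x / 2 / M := (Int.ediv_ediv_of_nonneg (by norm_num)).symm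
  rw [Int.emod_def, h2]
  have e : x - 2*M*(x/2/M) = x + (-(M*(x/2/M)))*2 := by ring
  rw [e, Int.add_mul_ediv_right _ _ (by norm_num : (2:Int) ≠ 0), Int.emod_def]
  ring

lemma pvModtwo (x M : Int) : (x % (2*M)) % 2 = x % 2 :=
  Int.emod_emod_of_dvd _ ⟨M, rfl⟩

-- the loop survives n bits iff the forced value t = (s - 2a - k) mod 2^n is bit-disjoint from a
lemma pvLoop_iff : ∀ (n : Nat) (a s k : Int), (k = 0 ∨ k = 1) →
    ((pvLoop a s k n).isSome = true ↔ pvDisj n ((s - 2*a - k) % 2^n) a) := by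
  intro n
  induction n with
  | zero =>
    intro a s k _
    simp only [pvLoop, Option.isSome_some, true_iff]
    intro i hi
    omega
  | succ n ih =>
    intro a s k hk
    have hM : (0:Int) < 2^n := by positivity
    have hpow : (2:Int)^(n+1) = 2*2^n := by rw [pow_succ]; ring
    rw [pvDisj_succ]
    have hb0 : ((s - 2*a - k) % 2^(n+1)) % 2 = (s - k) % 2 := by
      rw [hpow, pvModtwo]; omega
    have hdiv : ((s - 2*a - k) % 2^(n+1)) / 2 = ((s - 2*a - k)/2) % 2^n := by
      rw [hpow, pvHalve _ _]
    rcases hk with hk | hk <;> subst hk <;>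
      rcases Int.emod_two_eq a with ha | ha <;> rcases Int.emod_two_eq s with hs | hs
    -- k = 0, a even, s even : alive, k' = 0
    · rw [show pvLoop a s 0 (n+1) = pvLoop (a/2) (s/2) 0 n by simp [pvLoop, ha, hs],
        ih (a/2) (s/2) 0 (Or.inl rfl)]
      have e : (s - 2*a - 0)/2 = s/2 - 2*(a/2) - 0 := by omega
      constructor
      · intro h; exact ⟨by omega, by rw [hdiv, e]; exact h⟩
      · rintro ⟨_, h⟩; rw [hdiv, e] at h; exact h
    -- k = 0, a even, s odd : alive, k' = 0
    · rw [show pvLoop a s 0 (n+1) = pvLoop (a/2) (s/2) 0 n by simp [pvLoop, ha, hs],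
        ih (a/2) (s/2) 0 (Or.inl rfl)]
      have e : (s - 2*a - 0)/2 = s/2 - 2*(a/2) - 0 := by omega
      constructor
      · intro h; exact ⟨by omega, by rw [hdiv, e]; exact h⟩
      · rintro ⟨_, h⟩; rw [hdiv, e] at h; exact h
    -- k = 0, a odd, s even : alive (s%2 = k), k' = 1
    · rw [show pvLoop a s 0 (n+1) = pvLoop (a/2) (s/2) 1 n by simp [pvLoop, ha, hs],
        ih (a/2) (s/2) 1 (Or.inr rfl)]
      have e : (s - 2*a - 0)/2 = s/2 - 2*(a/2) - 1 := by omega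
      constructor
      · intro h; exact ⟨by omega, by rw [hdiv, e]; exact h⟩
      · rintro ⟨_, h⟩; rw [hdiv, e] at h; exact h
    -- k = 0, a odd, s odd : dead; and bit 0 collides
    · rw [show pvLoop a s 0 (n+1) = none by simp [pvLoop, ha, hs]]
      simp only [Option.isSome_none, Bool.false_eq_true, false_iff]
      rintro ⟨h0, -⟩
      exact h0 ⟨by omega, by omega⟩
    -- k = 1, a even, s even : alive, k' = 1
    · rw [show pvLoop a s 1 (n+1) = pvLoop (a/2) (s/2) 1 n by simp [pvLoop, ha, hs],
        ih (a/2) (s/2) 1 (Or.inr rfl)]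
      have e : (s - 2*a - 1)/2 = s/2 - 2*(a/2) - 1 := by omega
      constructor
      · intro h; exact ⟨by omega, by rw [hdiv, e]; exact h⟩
      · rintro ⟨_, h⟩; rw [hdiv, e] at h; exact h
    -- k = 1, a even, s odd : alive, k' = 0
    · rw [show pvLoop a s 1 (n+1) = pvLoop (a/2) (s/2) 0 n by simp [pvLoop, ha, hs],
        ih (a/2) (s/2) 0 (Or.inl rfl)]
      have e : (s - 2*a - 1)/2 = s/2 - 2*(a/2) - 0 := by omega
      constructor
      · intro h; exact ⟨by omega, by rw [hdiv, e]; exact h⟩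
      · rintro ⟨_, h⟩; rw [hdiv, e] at h; exact h
    -- k = 1, a odd, s even : dead; bit 0 collides
    · rw [show pvLoop a s 1 (n+1) = none by simp [pvLoop, ha, hs]]
      simp only [Option.isSome_none, Bool.false_eq_true, false_iff]
      rintro ⟨h0, -⟩
      exact h0 ⟨by omega, by omega⟩
    -- k = 1, a odd, s odd : alive (s%2 = k), k' = 1
    · rw [show pvLoop a s 1 (n+1) = pvLoop (a/2) (s/2) 1 n by simp [pvLoop, ha, hs],
        ih (a/2) (s/2) 1 (Or.inr rfl)]
      have e : (s - 2*a - 1)/2 = s/2 - 2*(a/2) - 1 := by omega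
      constructor
      · intro h; exact ⟨by omega, by rw [hdiv, e]; exact h⟩
      · rintro ⟨_, h⟩; rw [hdiv, e] at h; exact h

-- disjoint n-bit numbers add without carrying out
lemma pvDisj_add_lt : ∀ (n : Nat) (t a : Int), 0 ≤ t → t < 2^n → 0 ≤ a → a < 2^n →
    pvDisj n t a → t + a < 2^n := by
  intro n
  induction n with
  | zero =>
    intro t a h1 h2 h3 h4 _
    simp only [pow_zero] at *
    omega
  | succ n ih =>
    intro t a h1 h2 h3 h4 h
    rw [pvDisj_succ] at h
    obtain ⟨h0, hrest⟩ := h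
    have hpow : (2:Int)^(n+1) = 2*2^n := by rw [pow_succ]; ring
    have := ih (t/2) (a/2) (by omega) (by omega) (by omega) (by omega) hrest
    omega

lemma pvNatAndMod (P Q : Nat) : ((P &&& Q) % 2 = 1) ↔ (P % 2 = 1 ∧ Q % 2 = 1) := by
  have h := Nat.testBit_and P Q 0
  simp only [Nat.testBit_zero] at h
  have h2 := congrArg (· = true) h
  simpa using h2

lemma pvNatAndZero (P Q : Nat) :
    P &&& Q = 0 ↔ (¬(P % 2 = 1 ∧ Q % 2 = 1)) ∧ (P/2 &&& Q/2 = 0) := by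
  have hd : (P &&& Q)/2 = P/2 &&& Q/2 := Nat.and_div_two
  have hm := pvNatAndMod P Q
  omega

lemma pvNatAndSelf (P B : Nat) :
    P &&& B = P ↔ ((P % 2 = 1 → B % 2 = 1)) ∧ (P/2 &&& B/2 = P/2) := by
  have hd : (P &&& B)/2 = P/2 &&& B/2 := Nat.and_div_two
  have hm := pvNatAndMod P B
  omega

-- one halving step of the Python `&`-with-zero test, for nonnegative first argument
lemma pvBandZeroStep (d a : Int) (hd : 0 ≤ d) :
    PySem.Int.band d a = 0 ↔
      (¬(d % 2 = 1 ∧ a % 2 = 1)) ∧ PySem.Int.band (d/2) (a/2) = 0 := by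
  rcases le_or_gt 0 a with ha | ha
  · obtain ⟨P, rfl⟩ := Int.eq_ofNat_of_zero_le hd
    obtain ⟨Q, rfl⟩ := Int.eq_ofNat_of_zero_le ha
    have e1 : ((P:Int))/2 = ((P/2 : Nat) : Int) := by omega
    have e2 : ((Q:Int))/2 = ((Q/2 : Nat) : Int) := by omega
    rw [PySem.Int.band_of_nonneg (by omega) (by omega),
      e1, e2, PySem.Int.band_of_nonneg (by omega) (by omega)]
    simp only [Int.toNat_natCast]
    have h := pvNatAndZero P Q
    omega
  · -- a < 0 : Python's & via two's complement:  band d a = d - (d & ~a)  with ~a = -a-1 ≥ 0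
    obtain ⟨P, rfl⟩ := Int.eq_ofNat_of_zero_le hd
    obtain ⟨B, hB⟩ := Int.eq_ofNat_of_zero_le (show (0:Int) ≤ -a-1 by omega)
    have haB : a = -(B:Int)-1 := by omega
    subst haB
    have e1 : ((P:Int))/2 = ((P/2 : Nat) : Int) := by omega
    have e2 : (-(B:Int)-1)/2 = -((B/2 : Nat) : Int)-1 := by omega
    have hlt : ¬ (0:Int) ≤ -(B:Int)-1 := by omega
    have hlt2 : ¬ (0:Int) ≤ -((B/2:Nat):Int)-1 := by omega
    simp only [PySem.Int.band, e1, e2, if_pos (show (0:Int) ≤ (P:Int) by omega),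
      if_pos (show (0:Int) ≤ ((P/2:Nat):Int) by omega), if_neg hlt, if_neg hlt2]
    have eB : (-(-(B:Int)-1)-1).toNat = B := by omega
    have eB2 : (-(-((B/2:Nat):Int)-1)-1).toNat = B/2 := by omega
    simp only [eB, eB2, Int.toNat_natCast]
    have h := pvNatAndSelf P B
    have h1 : P &&& B ≤ P := Nat.and_le_left
    have h2 : P/2 &&& B/2 ≤ P/2 := Nat.and_le_left
    omega

lemma pvBandDisj : ∀ (n : Nat) (d a : Int), 0 ≤ d → d < 2^n →
    (PySem.Int.band d a = 0 ↔ pvDisj n d a) := by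
  intro n
  induction n with
  | zero =>
    intro d a h1 h2
    simp only [pow_zero] at h2
    have : d = 0 := by omega
    subst this
    rw [PySem.Int.band_comm, PySem.Int.band_zero]
    simp only [true_iff]
    intro i hi
    omega
  | succ n ih =>
    intro d a h1 h2
    have hpow : (2:Int)^(n+1) = 2*2^n := by rw [pow_succ]; ring
    rw [pvBandZeroStep d a h1, pvDisj_succ,
      ih (d/2) (a/2) (by omega) (by omega)]

lemma pvFoldlNone (a s : Int) (l : List Int) : l.foldl (checkStep a s) none = none := by
  induction l with
  | nil => rfl
  | cons x xs ih => simpa [checkStep] using ih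

-- evaluate one genuine step of A's loop at index i
lemma pvStepEval (a s : Int) (k : Int) (i : Nat) (hk : k = 0 ∨ k = 1) :
    checkStep a s (some k) (i:Int) =
      (if (a >>> i) % 2 = 1 then
        (if (s >>> i) % 2 = k then some 1 else none)
      else
        some (if k = 1 ∧ (s >>> i) % 2 = 0 then 1 else 0)) := by
  have hb : ∀ x : Int, PySem.Int.band x 1 = x % 2 := fun x => by
    rw [PySem.Int.band_one, PySem.Int.mod_eq_emod_of_pos (by norm_num)]
  simp only [checkStep, Int.toNat_natCast, hb]
  rcases Int.emod_two_eq (a >>> i) with ha | ha <;>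
    rcases Int.emod_two_eq (s >>> i) with hs | hs <;>
    rcases hk with hk | hk <;> subst hk <;>
    simp [ha, hs]

lemma pvShiftSucc (x : Int) (i : Nat) : x >>> (i+1) = (x >>> i) / 2 := by
  rw [Int.shiftRight_eq_div_pow, Int.shiftRight_eq_div_pow,
    Int.ediv_ediv_of_nonneg (by positivity)]
  congr 1

-- A's foldl over range(i, i+n) equals the peeled loop on the shifted arguments
lemma pvBridge (a s : Int) : ∀ (n : Nat) (i : Nat) (k : Int), (k = 0 ∨ k = 1) →
    (PySem.List.pyRange (i:Int) ((i:Int) + (n:Int))).foldl (checkStep a s) (some k)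
      = pvLoop (a >>> i) (s >>> i) k n := by
  intro n
  induction n with
  | zero =>
    intro i k _
    have : PySem.List.pyRange (i:Int) ((i:Int) + ((0:Nat):Int)) = [] := by
      simp [PySem.List.pyRange]
    rw [this]
    rfl
  | succ n ih =>
    intro i k hk
    rw [PySem.List.pyRange_one_cons (by push_cast; omega)]
    simp only [List.foldl_cons]
    rw [pvStepEval a s k i hk]
    have harg : (i:Int) + 1 = ((i+1 : Nat) : Int) := by push_cast; ring
    rcases Int.emod_two_eq (a >>> i) with ha | ha <;>
      rcases Int.emod_two_eq (s >>> i) with hs | hs <;>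
      rcases hk with hk | hk <;> subst hk <;>
      simp only [ha, hs] <;> norm_num <;>
      first
      | (rw [show (i:Int) + ((n:Int) + 1) = ((i+1 : Nat) : Int) + ((n:Nat) : Int) by push_cast; ring,
           harg, ih (i+1) 1 (by norm_num), pvShiftSucc, pvShiftSucc]
         simp [pvLoop, ha, hs])
      | (rw [show (i:Int) + ((n:Int) + 1) = ((i+1 : Nat) : Int) + ((n:Nat) : Int) by push_cast; ring,
           harg, ih (i+1) 0 (by norm_num), pvShiftSucc, pvShiftSucc]
         simp [pvLoop, ha, hs])
      | (rw [pvFoldlNone]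
         simp [pvLoop, ha, hs])

lemma pvShiftZero (x : Int) : x >>> (0:Nat) = x := by
  rw [Int.shiftRight_eq_div_pow]
  simp

-- ===== VERDICT (by name: the statement is the Claim_ definition above) =====
theorem check_spec : Claim_equal_check := by
  unfold Claim_equal_check Spec_check
  intro a s hdom
  have hb : -2147483648 ≤ a ∧ a ≤ 2147483648 ∧ -2147483648 ≤ s ∧ s ≤ 2147483648 := by
    simp only [Dom_check, pvDomInt, Bool.and_eq_true, decide_eq_true_eq] at hdom
    omega
  unfold check check_alt
  by_cases hgt : a > s
  · simp [hgt]
  · simp only [if_neg hgt]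
    have hle : a ≤ s := by omega
    have hfold : (PySem.List.pyRange 0 60).foldl (checkStep a s) (some 0)
        = pvLoop a s 0 60 := by
      have := pvBridge a s 60 0 0 (Or.inl rfl)
      simpa [pvShiftZero] using this
    have hiff := pvLoop_iff 60 a s 0 (Or.inl rfl)
    have e0 : s - 2*a - 0 = s - 2*a := by ring
    rw [e0] at hiff
    set d := s - 2*a with hdd
    by_cases hd0 : 0 ≤ d
    · have hlt : d < 2^60 := by omega
      have hmod : d % 2^60 = d := Int.emod_eq_of_lt hd0 hlt
      rw [hmod] at hiff
      have hband := pvBandDisj 60 d a hd0 hlt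
      rw [hfold]
      cases hres : pvLoop a s 0 60 with
      | none =>
        have hnd : ¬ pvDisj 60 d a := by
          rw [← hiff, hres]; simp
        rw [if_neg]
        rintro ⟨-, hz⟩
        exact hnd (hband.mp hz)
      | some k =>
        have hdj : pvDisj 60 d a := by
          rw [← hiff, hres]; rfl
        rw [if_pos ⟨hd0, hband.mpr hdj⟩]
    · -- d < 0 : the loop must die — otherwise d mod 2^60 = d + 2^60 and a would be
      -- bit-disjoint, giving d + 2^60 + a < 2^60, i.e. s < a, contradiction
      have hdneg : d < 0 := by omega
      have hapos : 0 < a := by omega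
      have hmod : d % 2^60 = d + 2^60 := by
        have h1 : (d + 2^60 * 1) % 2^60 = d % 2^60 := Int.add_mul_emod_self_left d (2^60) 1
        have h2 : (d + 2^60 * 1) % 2^60 = d + 2^60 := by
          rw [show d + 2^60 * 1 = d + 2^60 by ring]
          exact Int.emod_eq_of_lt (by omega) (by omega)
        omega
      rw [hmod] at hiff
      have hdead : pvLoop a s 0 60 = none := by
        cases hres : pvLoop a s 0 60 with
        | none => rfl
        | some k =>
          exfalso
          have hdj : pvDisj 60 (d + 2^60) a := by
            rw [← hiff, hres]; rfl
          have := pvDisj_add_lt 60 (d + 2^60) a (by omega) (by omega) (by omega)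
            (by omega) hdj
          omega
      rw [hfold, hdead]
      rw [if_neg]
      rintro ⟨h, -⟩
      omega
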